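-- pv_equiv track=rewrite | github.com/jackzim/insulator | functions.py | flatten_duplicates
-- ===== SOURCE A (Python) =====
-- def flatten_duplicates(full_list):
--     placeholderDict = {}
--     for sub in full_list:
--         key = sub[0]
--         values = sub[1:]
--         if key in placeholderDict:
--             placeholderDict[key] = [i+j for i,j in zip(values, placeholderDict[key])]
--         else:
--             placeholderDict[key] = values
--     final_list = [[k] + v for k,v in placeholderDict.items()]
--     return final_list
-- ===== SOURCE B (Python) =====
-- def flatten_duplicates(full_list):
--     groups = {}
--     for sub in full_list:
--         groups.setdefault(sub[0], []).append(sub[1:])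
--     return [[k] + [sum(col) for col in zip(*rows)] for k, rows in groups.items()]
-- ===== Notes on version B (the rewrite author's own statement) =====
-- stated objective: alternative
-- what changed: Instead of maintaining a running elementwise zip-sum per key, B groups all value-rows per key in one dict pass and then reduces each group column-wise with zip(*rows) and sum.
import Mathlib
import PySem

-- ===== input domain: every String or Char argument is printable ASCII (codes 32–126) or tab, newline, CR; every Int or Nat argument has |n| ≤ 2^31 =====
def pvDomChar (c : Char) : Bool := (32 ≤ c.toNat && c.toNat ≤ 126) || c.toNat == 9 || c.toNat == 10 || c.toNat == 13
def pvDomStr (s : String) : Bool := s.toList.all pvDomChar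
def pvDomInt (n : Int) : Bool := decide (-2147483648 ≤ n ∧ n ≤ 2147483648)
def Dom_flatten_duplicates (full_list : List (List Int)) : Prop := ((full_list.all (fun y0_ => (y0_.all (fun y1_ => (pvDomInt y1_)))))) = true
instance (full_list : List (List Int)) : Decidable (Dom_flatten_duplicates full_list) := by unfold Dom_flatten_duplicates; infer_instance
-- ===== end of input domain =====

-- B groups the rows per key first and then sums column-wise (alternative decomposition, same cost).

-- ===== PORT A =====
-- the loop body of A's for-loop
def flattenStepA (d : PySem.Dict Int (List Int)) (sub : List Int) : PySem.Dict Int (List Int) :=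
  let key := (PySem.List.pyGet? sub 0).getD 0   -- sub[0]; none = IndexError on empty sub, excluded by Pre_
  let values := PySem.List.slice sub (some 1) none   -- sub[1:]
  if d.contains key then
    d.insert key (List.zipWith (fun i j => i + j) values (d.getD key []))
  else
    d.insert key values

def flatten_duplicates (full_list : List (List Int)) : List (List Int) :=
  let placeholderDict := full_list.foldl flattenStepA PySem.Dict.empty
  placeholderDict.items.map (fun kv => [kv.1] ++ kv.2)

-- ===== PORT B =====
-- zip(*rows): column-wise truncating transpose; exact for rows ≠ [] (B only applies it to nonempty groups)
def pyZipStar : List (List Int) → List (List Int)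
  | [] => []
  | [r] => r.map (fun x => [x])
  | r :: rest => List.zipWith (fun x col => x :: col) r (pyZipStar rest)

-- the loop body of B's for-loop: groups.setdefault(sub[0], []).append(sub[1:])
def flattenStepB (d : PySem.Dict Int (List (List Int))) (sub : List Int) : PySem.Dict Int (List (List Int)) :=
  d.insert ((PySem.List.pyGet? sub 0).getD 0)
    (d.getD ((PySem.List.pyGet? sub 0).getD 0) [] ++ [PySem.List.slice sub (some 1) none])

def flatten_duplicates_alt (full_list : List (List Int)) : List (List Int) :=
  let groups := full_list.foldl flattenStepB PySem.Dict.empty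
  groups.items.map (fun kv => [kv.1] ++ (pyZipStar kv.2).map (fun col => col.foldl (· + ·) 0))

-- ===== PRECONDITION & SPEC =====
-- Pre_ excludes lists containing an empty sublist: there A raises IndexError on sub[0].
def Pre_flatten_duplicates (full_list : List (List Int)) : Prop :=
  ∀ sub ∈ full_list, sub ≠ []
instance (full_list : List (List Int)) : Decidable (Pre_flatten_duplicates full_list) := by
  unfold Pre_flatten_duplicates; infer_instance

def pvWitness_flatten_duplicates : List (List Int) := [[1, 2, 3], [2, 5], [1, 4, 7]]

def Spec_flatten_duplicates (full_list : List (List Int)) (out : List (List Int)) : Prop := out = flatten_duplicates_alt full_list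
instance (full_list : List (List Int)) (out : List (List Int)) : Decidable (Spec_flatten_duplicates full_list out) := by unfold Spec_flatten_duplicates; infer_instance

-- ===== CLAIM (what is proved, stated in full; the proofs are below) =====
def Claim_equal_flatten_duplicates : Prop := ∀ (full_list : List (List Int)), Dom_flatten_duplicates full_list → Pre_flatten_duplicates full_list → Spec_flatten_duplicates full_list (flatten_duplicates full_list)

-- ===== LEMMAS AND PROOFS =====

-- comb rows is exactly what B computes for a group of rows
def comb (rows : List (List Int)) : List Int :=
  (pyZipStar rows).map (fun col => col.foldl (· + ·) 0)

-- the A-dict is the B-dict with comb applied to every value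
def mapComb (d : PySem.Dict Int (List (List Int))) : PySem.Dict Int (List Int) :=
  PySem.Dict.mk (d.items.map (fun p => (p.1, comb p.2)))

theorem foldl_add_init (col : List Int) (a : Int) :
    col.foldl (· + ·) a = a + col.foldl (· + ·) 0 := by
  induction col generalizing a with
  | nil => simp
  | cons x t ih =>
    simp only [List.foldl_cons]
    rw [ih (a + x), ih (0 + x)]
    ring

theorem comb_singleton (v : List Int) : comb [v] = v := by
  simp [comb, pyZipStar, List.map_map, Function.comp_def]

theorem comb_cons (r s : List Int) (rows : List (List Int)) :
    comb (r :: s :: rows) = List.zipWith (fun i j => i + j) r (comb (s :: rows)) := by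
  simp only [comb, pyZipStar, List.map_zipWith, List.zipWith_map_right]
  have : (fun (x : Int) (col : List Int) => List.foldl (· + ·) 0 (x :: col)) =
      (fun (x : Int) (col : List Int) => x + List.foldl (· + ·) 0 col) := by
    funext x col
    simp only [List.foldl_cons]
    rw [foldl_add_init]
    ring
  rw [this]

theorem zipWith_add_comm (a b : List Int) :
    List.zipWith (fun i j => i + j) a b = List.zipWith (fun i j => i + j) b a := by
  induction a generalizing b with
  | nil => cases b <;> simp
  | cons x a ih =>
    cases b with
    | nil => simp
    | cons y b => simp only [List.zipWith_cons_cons, ih]; rw [Int.add_comm]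

theorem zipWith_add_swap (a b c : List Int) :
    List.zipWith (fun i j => i + j) a (List.zipWith (fun i j => i + j) b c) =
    List.zipWith (fun i j => i + j) b (List.zipWith (fun i j => i + j) a c) := by
  induction a generalizing b c with
  | nil => cases b <;> cases c <;> simp
  | cons x a ih =>
    cases b with
    | nil => simp
    | cons y b =>
      cases c with
      | nil => simp
      | cons z c =>
        simp only [List.zipWith_cons_cons, List.cons.injEq]
        exact ⟨by ring, ih b c⟩

theorem comb_append (rows : List (List Int)) (v : List Int) (h : rows ≠ []) :
    comb (rows ++ [v]) = List.zipWith (fun i j => i + j) v (comb rows) := by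
  induction rows with
  | nil => exact absurd rfl h
  | cons r rows ih =>
    cases rows with
    | nil =>
      rw [List.cons_append, List.nil_append, comb_cons, comb_singleton, comb_singleton]
      exact zipWith_add_comm r v
    | cons s rows =>
      have h1 : (r :: s :: rows) ++ [v] = r :: s :: (rows ++ [v]) := by simp
      rw [h1, comb_cons]
      have h2 : s :: (rows ++ [v]) = (s :: rows) ++ [v] := by simp
      rw [h2, ih (by simp), comb_cons, zipWith_add_swap]

theorem get?_mapComb (d : PySem.Dict Int (List (List Int))) (k : Int) :
    (mapComb d).get? k = (d.get? k).map comb := by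
  obtain ⟨items⟩ := d
  induction items with
  | nil => rfl
  | cons p rest ih =>
    obtain ⟨k', v⟩ := p
    show (PySem.Dict.mk (((k', v) :: rest).map (fun p => (p.1, comb p.2)))).get? k = _
    rw [List.map_cons]
    rw [PySem.Dict.get?_mk_cons, PySem.Dict.get?_mk_cons]
    by_cases h : k' == k
    · simp [h]
    · simp only [h, Bool.false_eq_true, if_false]
      exact ih

theorem contains_mapComb (d : PySem.Dict Int (List (List Int))) (k : Int) :
    (mapComb d).contains k = d.contains k := by
  rw [PySem.Dict.contains_eq_isSome_get?, PySem.Dict.contains_eq_isSome_get?, get?_mapComb]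
  cases d.get? k <;> rfl

theorem getD_mapComb (d : PySem.Dict Int (List (List Int))) (k : Int) :
    (mapComb d).getD k [] = comb (d.getD k []) := by
  rw [PySem.Dict.getD_eq_get?_getD, PySem.Dict.getD_eq_get?_getD, get?_mapComb]
  cases d.get? k
  · rfl
  · rfl

theorem items_mapComb (d : PySem.Dict Int (List (List Int))) :
    (mapComb d).items = d.items.map (fun p => (p.1, comb p.2)) := rfl

theorem insert_mapComb (d : PySem.Dict Int (List (List Int))) (k : Int) (v : List (List Int)) :
    (mapComb d).insert k (comb v) = mapComb (d.insert k v) := by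
  apply PySem.Dict.ext
  by_cases h : d.contains k = true
  · rw [PySem.Dict.items_insert_of_contains _ _ ((contains_mapComb d k).trans h),
      items_mapComb, items_mapComb, PySem.Dict.items_insert_of_contains _ _ h,
      List.map_map, List.map_map]
    apply List.map_congr_left
    intro p _
    by_cases hk : p.1 == k <;> simp [Function.comp, hk]
  · have h' : d.contains k = false := Bool.eq_false_iff.mpr h
    rw [PySem.Dict.items_insert_of_not_contains _ _ ((contains_mapComb d k).trans h'),
      items_mapComb, items_mapComb, PySem.Dict.items_insert_of_not_contains _ _ h',
      List.map_append]
    rfl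

theorem value_ne_nil_of_contains (d : PySem.Dict Int (List (List Int))) (k : Int)
    (hv : ∀ p ∈ d.items, p.2 ≠ ([] : List (List Int))) (h : d.contains k = true) :
    d.getD k [] ≠ [] := by
  rw [PySem.Dict.contains_eq_isSome_get?] at h
  rcases hg : d.get? k with _ | v
  · rw [hg] at h; simp at h
  · rw [PySem.Dict.getD_of_get?_eq_some _ _ hg]
    exact hv _ (PySem.Dict.mem_items_of_get?_eq_some _ hg)

theorem step_commute (d : PySem.Dict Int (List (List Int))) (sub : List Int)
    (hs : sub ≠ []) (hv : ∀ p ∈ d.items, p.2 ≠ ([] : List (List Int))) :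
    flattenStepA (mapComb d) sub = mapComb (flattenStepB d sub) := by
  obtain ⟨k, vs⟩ := List.exists_cons_of_ne_nil hs
  obtain ⟨vs, rfl⟩ := vs
  have hkey : (PySem.List.pyGet? (k :: vs) 0).getD 0 = k := by
    rw [PySem.List.pyGet?_zero_cons]; rfl
  have hvals : PySem.List.slice (k :: vs) (some 1) none = vs := by
    rw [PySem.List.slice_from_one]; rfl
  simp only [flattenStepA, flattenStepB, hkey, hvals, contains_mapComb]
  by_cases h : d.contains k = true
  · rw [if_pos h, getD_mapComb, ← comb_append _ _ (value_ne_nil_of_contains d k hv h),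
      insert_mapComb]
  · have h' : d.contains k = false := Bool.eq_false_iff.mpr h
    rw [if_neg h, PySem.Dict.getD_of_not_contains _ _ h', List.nil_append]
    conv_lhs => rw [← comb_singleton vs]
    exact insert_mapComb d k [vs]

theorem value_ne_nil_step (d : PySem.Dict Int (List (List Int))) (sub : List Int)
    (hv : ∀ p ∈ d.items, p.2 ≠ ([] : List (List Int))) :
    ∀ p ∈ (flattenStepB d sub).items, p.2 ≠ ([] : List (List Int)) := by
  intro p hp
  unfold flattenStepB at hp
  rcases (PySem.Dict.mem_items_insert _ _ _ _).mp hp with h | h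
  · rw [h]; simp
  · exact hv _ h.1

theorem fold_invariant (l : List (List Int)) (d : PySem.Dict Int (List (List Int)))
    (hl : ∀ sub ∈ l, sub ≠ []) (hv : ∀ p ∈ d.items, p.2 ≠ ([] : List (List Int))) :
    l.foldl flattenStepA (mapComb d) = mapComb (l.foldl flattenStepB d) := by
  induction l generalizing d with
  | nil => rfl
  | cons sub l ih =>
    rw [List.foldl_cons, List.foldl_cons,
      step_commute d sub (hl sub (by simp)) hv]
    exact ih _ (fun s hs => hl s (by simp [hs])) (value_ne_nil_step d sub hv)

-- ===== VERDICT (by name: the statement is the Claim_ definition above) =====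
theorem flatten_duplicates_spec : Claim_equal_flatten_duplicates := by
  intro full_list _ hpre
  unfold Spec_flatten_duplicates
  simp only [flatten_duplicates, flatten_duplicates_alt]
  have hempty : (PySem.Dict.empty : PySem.Dict Int (List Int)) = mapComb PySem.Dict.empty := rfl
  rw [hempty, fold_invariant full_list PySem.Dict.empty hpre (by intro p hp; simp [PySem.Dict.empty] at hp),
    items_mapComb, List.map_map]
  rfl
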